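-- pv_equiv track=rewrite | github.com/sumca1/escriptorium-project | CORE/eScriptorium_UNIFIED/config/app/apps/core/confidence_analyzer.py | _split_into_words
-- ===== SOURCE A (Python) =====
-- from typing import List, Dict, Optional, Tuple
--
-- def _split_into_words(text: str) -> List[Tuple[str, int, int]]:
--     """
--     מפצל טקסט למילים עם מיקומים
--     Split text into words with positions
--
--     Returns:
--         List of (word_text, start_pos, end_pos)
--     """
--     words = []
--     current_word = []
--     word_start = 0
--
--     for i, char in enumerate(text):
--         if char.isspace():
--             if current_word:
--                 words.append((
--                     ''.join(current_word),
--                     word_start,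
--                     i
--                 ))
--                 current_word = []
--         else:
--             if not current_word:
--                 word_start = i
--             current_word.append(char)
--
--     # Add last word
--     if current_word:
--         words.append((
--             ''.join(current_word),
--             word_start,
--             len(text)
--         ))
--
--     return words
-- ===== SOURCE B (Python) =====
-- from typing import List, Tuple
--
-- def _split_into_words(text: str) -> List[Tuple[str, int, int]]:
--     """Split text into words with (word, start, end) positions.
--
--     Staged boundary detection: mark whitespace, find word-start and word-end
--     indices by comparing each position with its neighbour, then slice.
--     """
--     n = len(text)
--     sp = [ch.isspace() for ch in text]
--     starts = [i for i in range(n) if not sp[i] and (i == 0 or sp[i - 1])]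
--     ends = [i + 1 for i in range(n) if not sp[i] and (i == n - 1 or sp[i + 1])]
--     return [(text[s:e], s, e) for s, e in zip(starts, ends)]
-- ===== Notes on version B (the rewrite author's own statement) =====
-- stated objective: alternative
-- what changed: Replaces A's single-pass buffer/flush state machine with staged boundary detection: mark whitespace, compute word-start and word-end indices by comparing each position with its neighbour via comprehensions over range(n), then build the result by slicing text[s:e] over zip(starts, ends).
import Mathlib
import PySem

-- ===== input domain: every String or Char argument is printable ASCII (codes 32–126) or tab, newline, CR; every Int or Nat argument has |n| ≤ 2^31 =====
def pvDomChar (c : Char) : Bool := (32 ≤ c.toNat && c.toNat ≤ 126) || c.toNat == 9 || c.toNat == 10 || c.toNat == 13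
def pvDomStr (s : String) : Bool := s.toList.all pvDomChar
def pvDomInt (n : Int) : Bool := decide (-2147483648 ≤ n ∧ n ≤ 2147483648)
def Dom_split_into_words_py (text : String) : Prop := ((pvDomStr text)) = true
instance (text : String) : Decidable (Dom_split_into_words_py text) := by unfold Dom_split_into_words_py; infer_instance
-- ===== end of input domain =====

-- B replaces A's per-character buffer/flush state machine with staged boundary detection
-- (comprehensions marking word starts/ends by neighbour comparison, then slicing); alternative decomposition, same cost.

-- ===== PORT A =====
-- helper: the trailing flush of A ("if current_word: words.append((..., len(text)))")
def pvFinish (st : List (String × Int × Int) × List Char × Int) (n : Int) :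
    List (String × Int × Int) :=
  if st.2.1 ≠ [] then st.1 ++ [(String.mk st.2.1, st.2.2, n)] else st.1

-- the "for i, char in enumerate(text)" loop, state (words, current_word, word_start)
def aLoop : List Char → Nat → List (String × Int × Int) → List Char → Int →
    List (String × Int × Int) × List Char × Int
  | [], _, words, cur, ws => (words, cur, ws)
  | c :: rest, i, words, cur, ws =>
    if PySem.Chars.isspace c then
      if cur ≠ [] then aLoop rest (i + 1) (words ++ [(String.mk cur, ws, (i : Int))]) [] ws
      else aLoop rest (i + 1) words cur ws
    else
      if cur = [] then aLoop rest (i + 1) words (cur ++ [c]) (i : Int)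
      else aLoop rest (i + 1) words (cur ++ [c]) ws

def split_into_words_py (text : String) : List (String × Int × Int) :=
  pvFinish (aLoop text.toList 0 [] [] 0) (text.toList.length : Int)

-- ===== PORT B =====
-- Source B: sp = [ch.isspace() for ch in text]; starts/ends by neighbour comparison; slice.
-- sp[i-1]/sp[i+1] are guarded by Python's short-circuit 'or'; getD's default is never reached.
def split_into_words_py_alt (text : String) : List (String × Int × Int) :=
  let cs := text.toList
  let n := cs.length
  let sp := cs.map PySem.Chars.isspace
  let starts := (List.range n).filter (fun i => !(sp.getD i true) && (i == 0 || sp.getD (i - 1) true))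
  let ends : List Nat := ((List.range n).filter (fun i => !(sp.getD i true) && (i == n - 1 || sp.getD (i + 1) true))).map (· + 1)
  (starts.zip ends).map (fun p =>
    (String.mk (PySem.List.slice cs (some (p.1 : Int)) (some (p.2 : Int))), (p.1 : Int), (p.2 : Int)))

-- ===== PRECONDITION & SPEC =====
def Spec_split_into_words_py (text : String) (out : List (String × Int × Int)) : Prop := out = split_into_words_py_alt text
instance (text : String) (out : List (String × Int × Int)) : Decidable (Spec_split_into_words_py text out) := by unfold Spec_split_into_words_py; infer_instance

-- ===== CLAIM (what is proved, stated in full; the proofs are below) =====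
def Claim_equal_split_into_words_py : Prop := ∀ (text : String), Dom_split_into_words_py text → Spec_split_into_words_py text (split_into_words_py text)

-- ===== LEMMAS AND PROOFS =====


def startsR : List Char → Bool → List Nat
  | [], _ => []
  | c :: cs, b =>
    (if !PySem.Chars.isspace c && b then [0] else []) ++
      (startsR cs (PySem.Chars.isspace c)).map (· + 1)

def endsR : List Char → List Nat
  | [] => []
  | c :: cs =>
    (if !PySem.Chars.isspace c &&
        (match cs with | [] => true | d :: _ => PySem.Chars.isspace d) then [1] else []) ++
      (endsR cs).map (· + 1)

def Pstart (cs : List Char) (b : Bool) (i : Nat) : Bool :=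
  !((cs.map PySem.Chars.isspace).getD i true) &&
    (if i = 0 then b else (cs.map PySem.Chars.isspace).getD (i - 1) true)

theorem starts_filter (cs : List Char) (b : Bool) :
    (List.range cs.length).filter (Pstart cs b) = startsR cs b := by
  induction cs generalizing b with
  | nil => simp [startsR]
  | cons c rest ih =>
    rw [List.length_cons, List.range_succ_eq_map, List.filter_cons, List.filter_map]
    have hshift : (Pstart (c :: rest) b) ∘ Nat.succ = Pstart rest (PySem.Chars.isspace c) := by
      funext i
      cases i <;> simp [Pstart, Function.comp]
    rw [hshift, ih]
    cases hb : Pstart (c :: rest) b 0 <;>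
      simp_all [Pstart, startsR]

theorem ends_filter (cs : List Char) :
    ((List.range cs.length).filter (fun i =>
        !((cs.map PySem.Chars.isspace).getD i true) &&
          (i == cs.length - 1 || (cs.map PySem.Chars.isspace).getD (i + 1) true))).map (· + 1) =
      endsR cs := by
  induction cs with
  | nil => simp [endsR]
  | cons c rest ih =>
    simp only [List.length_cons, Nat.add_sub_cancel]
    rw [List.range_succ_eq_map, List.filter_cons, List.filter_map]
    have hshift : ∀ i ∈ List.range rest.length,
        ((fun i => !(((c :: rest).map PySem.Chars.isspace).getD i true) &&
          (i == rest.length || ((c :: rest).map PySem.Chars.isspace).getD (i + 1) true)) ∘ Nat.succ) i =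
        (fun i => !((rest.map PySem.Chars.isspace).getD i true) &&
          (i == rest.length - 1 || (rest.map PySem.Chars.isspace).getD (i + 1) true)) i := by
      intro i hi
      simp only [List.mem_range] at hi
      have h1 : (i + 1 == rest.length) = (i == rest.length - 1) := by
        cases h : (i == rest.length - 1) <;> simp_all <;> omega
      simp [Function.comp, h1]
    rw [List.filter_congr hshift]
    cases rest with
    | nil => cases hc : PySem.Chars.isspace c <;> simp [endsR, hc]
    | cons d rs =>
      have hsucc : (Nat.succ : Nat → Nat) = (· + 1) := funext fun x => rfl
      rw [hsucc]
      have hP0 : (!(((c :: d :: rs).map PySem.Chars.isspace).getD 0 true) &&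
          (0 == (d :: rs).length || ((c :: d :: rs).map PySem.Chars.isspace).getD (0 + 1) true)) =
          (!PySem.Chars.isspace c && PySem.Chars.isspace d) := by simp
      rw [hP0]
      conv_rhs => rw [endsR]
      rw [← ih]
      cases hcd : (!PySem.Chars.isspace c && PySem.Chars.isspace d) <;> simp [hcd]

def bGo : List Char → Nat → List (String × Int × Int)
  | [], _ => []
  | c :: rest, idx =>
    let k := PySem.Chars.isspace c
    let run := c :: rest.takeWhile (fun d => PySem.Chars.isspace d == k)
    let rest' := rest.dropWhile (fun d => PySem.Chars.isspace d == k)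
    if k then bGo rest' (idx + run.length)
    else (String.mk run, (idx : Int), ((idx + run.length : Nat) : Int)) :: bGo rest' (idx + run.length)
  termination_by cs _ => cs.length
  decreasing_by
    all_goals exact Nat.lt_succ_of_le (List.length_dropWhile_le _ _)

theorem beq_isspace_true (d : Char) :
    (PySem.Chars.isspace d == true) = PySem.Chars.isspace d := by
  cases h : PySem.Chars.isspace d <;> simp

theorem beq_isspace_false (d : Char) :
    (PySem.Chars.isspace d == false) = !PySem.Chars.isspace d := by
  cases h : PySem.Chars.isspace d <;> simp

theorem bGo_space (c : Char) (rest : List Char) (idx : Nat)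
    (h : PySem.Chars.isspace c = true) :
    bGo (c :: rest) idx = bGo rest (idx + 1) := by
  rw [bGo]
  simp only [h, if_pos, beq_isspace_true, List.length_cons]
  cases rest with
  | nil => simp [bGo]
  | cons d rs =>
    cases hd : PySem.Chars.isspace d with
    | true =>
      rw [bGo]
      simp [hd, Nat.add_comm, Nat.add_left_comm]
    | false =>
      simp [hd]

def Wmap (cs : List Char) (idx : Nat) : List (String × Int × Int) :=
  ((startsR cs true).zip (endsR cs)).map (fun p =>
    (String.mk ((cs.drop p.1).take (p.2 - p.1)), ((idx + p.1 : Nat) : Int), ((idx + p.2 : Nat) : Int)))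

-- all-nonspace prefix shifts the starts of the rest (flag stays false)
theorem startsR_nonspace_prefix (t u : List Char)
    (ht : ∀ c ∈ t, PySem.Chars.isspace c = false) :
    startsR (t ++ u) false = (startsR u false).map (· + t.length) := by
  induction t with
  | nil => simp
  | cons c t' ih =>
    have hc := ht c (by simp)
    rw [List.cons_append, startsR]
    simp only [hc, Bool.not_false, Bool.and_true]
    rw [ih (fun d hd => ht d (by simp [hd]))]
    simp [List.map_map, Function.comp, Nat.add_comm, Nat.add_left_comm, Nat.add_assoc]

-- when u is empty or starts with a space, the initial flag does not matter
theorem startsR_flag_irrel (u : List Char)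
    (hu : u = [] ∨ ∃ d u', u = d :: u' ∧ PySem.Chars.isspace d = true) :
    startsR u false = startsR u true := by
  rcases hu with h | ⟨d, u', rfl, hd⟩
  · subst h; rfl
  · simp [startsR, hd]

-- a maximal nonspace run contributes one end at its length
theorem endsR_nonspace_run (t u : List Char) (ht0 : t ≠ [])
    (ht : ∀ c ∈ t, PySem.Chars.isspace c = false)
    (hu : u = [] ∨ ∃ d u', u = d :: u' ∧ PySem.Chars.isspace d = true) :
    endsR (t ++ u) = t.length :: (endsR u).map (· + t.length) := by
  induction t with
  | nil => simp at ht0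
  | cons c t' ih =>
    have hc := ht c (by simp)
    rw [List.cons_append, endsR.eq_def]
    cases t' with
    | nil =>
      rcases hu with h | ⟨d, u', rfl, hd⟩
      · subst h; simp [hc, List.map_map, Nat.add_comm]
      · simp [hc, hd, List.map_map, Nat.add_comm]
    | cons e t'' =>
      have he := ht e (by simp)
      have hnext : (match (e :: t'') ++ u with | [] => true | d :: _ => PySem.Chars.isspace d) = false := by
        simp [he]
      simp only []
      rw [ih (by simp) (fun d hd => ht d (by simp [hd]))]
      simp [hc, he, hnext, List.map_map, Function.comp, Nat.add_comm, Nat.add_left_comm, Nat.add_assoc]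

theorem wmap_eq_bGo (cs : List Char) (idx : Nat) : Wmap cs idx = bGo cs idx := by
  match cs with
  | [] => simp [Wmap, startsR, endsR, bGo]
  | c :: rest =>
    cases hc : PySem.Chars.isspace c with
    | true =>
      rw [bGo_space c rest idx hc, ← wmap_eq_bGo rest (idx + 1)]
      unfold Wmap
      rw [startsR, endsR.eq_def]
      simp only [hc, Bool.not_true, Bool.false_and, Bool.false_eq_true, if_false, List.nil_append]
      rw [List.zip_map, List.map_map]
      apply List.map_congr_left
      intro p _
      simp [Function.comp, Nat.add_comm, Nat.add_left_comm, Nat.add_assoc, Nat.succ_sub_succ]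
    | false =>
      have htw : rest.takeWhile (fun d => !PySem.Chars.isspace d) ++
          rest.dropWhile (fun d => !PySem.Chars.isspace d) = rest :=
        List.takeWhile_append_dropWhile
      set tw := rest.takeWhile (fun d => !PySem.Chars.isspace d) with htwdef
      set u := rest.dropWhile (fun d => !PySem.Chars.isspace d) with hudef
      have hall : ∀ x ∈ tw, PySem.Chars.isspace x = false := by
        intro x hx
        have := List.mem_takeWhile_imp (htwdef ▸ hx)
        simpa using this
      have hu : u = [] ∨ ∃ d u', u = d :: u' ∧ PySem.Chars.isspace d = true := by
        cases hcase : u with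
        | nil => exact Or.inl rfl
        | cons d u' =>
          refine Or.inr ⟨d, u', rfl, ?_⟩
          have := List.head?_dropWhile_not (fun d => !PySem.Chars.isspace d) rest
          rw [← hudef, hcase] at this
          simpa using this
      have hlen : u.length < (c :: rest).length := by
        have := List.length_dropWhile_le (p := fun d => !PySem.Chars.isspace d) (l := rest)
        rw [← hudef] at this
        simp only [List.length_cons]; omega
      -- B side shapes
      have hstarts : startsR (c :: rest) true =
          0 :: (startsR u true).map (· + (tw.length + 1)) := by
        rw [startsR]
        simp only [hc, Bool.not_false, Bool.true_and, if_pos]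
        rw [← htw, startsR_nonspace_prefix tw u hall,
          startsR_flag_irrel u hu, List.map_map]
        simp [Function.comp, Nat.add_comm, Nat.add_left_comm, Nat.add_assoc]
      have hends : endsR (c :: rest) =
          (tw.length + 1) :: (endsR u).map (· + (tw.length + 1)) := by
        have : endsR ((c :: tw) ++ u) =
            (c :: tw).length :: (endsR u).map (· + (c :: tw).length) :=
          endsR_nonspace_run (c :: tw) u (by simp)
            (by intro x hx; rcases List.mem_cons.mp hx with rfl | hx; exact hc; exact hall x hx)
            hu
        rw [List.cons_append, htw] at this
        simpa using this
      rw [bGo]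
      simp only [hc, beq_isspace_false, if_neg, Bool.false_eq_true, not_false_eq_true]
      rw [← htwdef, ← hudef, ← wmap_eq_bGo u (idx + (c :: tw).length)]
      unfold Wmap
      rw [hstarts, hends, List.zip_cons_cons, List.map_cons, List.zip_map, List.map_map]
      congr 1
      · -- head element
        have htake : (c :: rest).take (tw.length + 1) = c :: tw := by
          rw [← htw, ← List.cons_append,
            show tw.length + 1 = (c :: tw).length by simp, List.take_left]
        simp [htake, Nat.add_comm, Nat.add_left_comm]
        rw [Nat.add_comm 1 tw.length, htake]
      · -- tail
        apply List.map_congr_left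
        intro p _
        have hdrop : (c :: rest).drop (p.1 + (tw.length + 1)) = u.drop p.1 := by
          rw [← htw, ← List.cons_append, Nat.add_comm,
            show tw.length + 1 = (c :: tw).length by simp,
            List.drop_length_add_append]
        simp [Function.comp, hdrop, Nat.add_comm, Nat.add_left_comm, Nat.add_assoc,
          Nat.add_sub_add_right, List.length_cons]
        rw [Nat.add_comm 1 tw.length, hdrop]
  termination_by cs.length
  decreasing_by
    all_goals simp only [List.length_cons]
    all_goals first
      | omega
      | (have := List.length_dropWhile_le (p := fun d => !PySem.Chars.isspace d) (l := rest); omega)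

mutual
-- A's loop with an empty current word behaves like the run scan
theorem aux_empty (cs : List Char) (idx : Nat) (words : List (String × Int × Int)) (ws : Int) :
    pvFinish (aLoop cs idx words [] ws) ((idx : Int) + cs.length) = words ++ bGo cs idx := by
  cases cs with
  | nil => simp [aLoop, pvFinish, bGo]
  | cons c rest =>
    cases hc : PySem.Chars.isspace c with
    | true =>
      rw [aLoop]
      simp only [hc, if_pos, ne_eq, not_true_eq_false, if_neg, not_false_eq_true]
      rw [bGo_space c rest idx hc]
      have := aux_empty rest (idx + 1) words ws
      simpa [Nat.add_comm, Nat.add_assoc, Nat.add_left_comm,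
        Int.add_comm, Int.add_assoc, Int.add_left_comm] using this
    | false =>
      rw [aLoop]
      simp only [hc, Bool.false_eq_true, if_neg, if_pos, not_false_eq_true, List.nil_append]
      have := aux_cur rest (idx + 1) words [c] (idx : Int) (by simp)
      rw [bGo]
      simp only [hc, Bool.false_eq_true, if_neg, beq_isspace_false, List.length_cons]
      simpa [Nat.add_comm, Nat.add_assoc, Nat.add_left_comm,
        Int.add_comm, Int.add_assoc, Int.add_left_comm] using this
  termination_by cs.length

-- A's loop with a pending word cur (started at ws) emits cur extended by the current run
theorem aux_cur (cs : List Char) (idx : Nat) (words : List (String × Int × Int))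
    (cur : List Char) (ws : Int) (h : cur ≠ []) :
    pvFinish (aLoop cs idx words cur ws) ((idx : Int) + cs.length) =
      words ++ (String.mk (cur ++ cs.takeWhile (fun d => !PySem.Chars.isspace d)), ws,
          ((idx + (cs.takeWhile (fun d => !PySem.Chars.isspace d)).length : Nat) : Int)) ::
        bGo (cs.dropWhile (fun d => !PySem.Chars.isspace d))
          (idx + (cs.takeWhile (fun d => !PySem.Chars.isspace d)).length) := by
  cases cs with
  | nil => simp [aLoop, pvFinish, bGo, h]
  | cons c rest =>
    cases hc : PySem.Chars.isspace c with
    | true =>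
      rw [aLoop]
      simp only [hc, if_pos, h, ne_eq, not_false_eq_true]
      have := aux_empty rest (idx + 1) (words ++ [(String.mk cur, ws, (idx : Int))]) ws
      simp only [List.takeWhile_cons, List.dropWhile_cons, hc, Bool.not_true, Bool.false_eq_true,
        if_false, List.length_nil, Nat.add_zero, List.append_nil]
      rw [bGo_space c rest idx hc]
      simpa [Nat.add_comm, Nat.add_assoc, Nat.add_left_comm,
        Int.add_comm, Int.add_assoc, Int.add_left_comm] using this
    | false =>
      rw [aLoop]
      simp only [hc, Bool.false_eq_true, if_neg, h, if_neg, not_false_eq_true]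
      have := aux_cur rest (idx + 1) words (cur ++ [c]) ws (by simp)
      simp only [List.takeWhile_cons, List.dropWhile_cons, hc, Bool.not_false, if_pos,
        List.length_cons]
      simpa [Nat.add_comm, Nat.add_assoc, Nat.add_left_comm,
        Int.add_comm, Int.add_assoc, Int.add_left_comm, List.append_assoc] using this
  termination_by cs.length
end

theorem altB_eq_Wmap (text : String) :
    split_into_words_py_alt text = Wmap text.toList 0 := by
  unfold split_into_words_py_alt Wmap
  dsimp only
  have hs : (List.range text.toList.length).filter (fun i =>
      !((text.toList.map PySem.Chars.isspace).getD i true) &&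
        (i == 0 || (text.toList.map PySem.Chars.isspace).getD (i - 1) true)) =
      startsR text.toList true := by
    rw [← starts_filter]
    apply List.filter_congr
    intro i _
    cases i <;> simp [Pstart]
  rw [hs, ends_filter]
  apply List.map_congr_left
  intro p _
  simp [PySem.List.slice_natCast]

theorem a_eq_bGo (text : String) :
    split_into_words_py text = bGo text.toList 0 := by
  unfold split_into_words_py
  have := aux_empty text.toList 0 [] 0
  simpa using this

-- ===== VERDICT (by name: the statement is the Claim_ definition above) =====
theorem split_into_words_py_spec : Claim_equal_split_into_words_py := by
  intro text _
  unfold Spec_split_into_words_py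
  rw [a_eq_bGo, ← wmap_eq_bGo, altB_eq_Wmap]
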